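-- pv_equiv track=rewrite | github.com/tel/FenemesHMM | data.py | alphabet_baseforms
-- ===== SOURCE A (Python) =====
-- def alphabet_baseforms(vocab):
--     """ Alphabet baseforms are generated from the spelling of the vocabulary
--     term. """
--
--     alphabet = 'abcdefghijklmnopqrstuwvxyz0123456789'
--     alpha = dict( (letter, idx)
--                   for idx, letter
--                   in enumerate(alphabet) )
--     out = []
--     for word in vocab:
--         bf = []
--         lastfeneme = '-1'
--         word = word.lower()
--         for letter in word:
--             idx = alpha[letter]
--             if idx != lastfeneme:
--                 bf.append(idx)
--                 lastfeneme = idx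
--         out.append(bf)
--     return out, len(alphabet)
-- ===== SOURCE B (Python) =====
-- def alphabet_baseforms(vocab):
--     """ Alphabet baseforms are generated from the spelling of the vocabulary
--     term. """
--
--     alphabet = 'abcdefghijklmnopqrstuwvxyz0123456789'
--
--     def baseform(word):
--         # peel off one maximal run of identical letters at a time
--         w = word.lower()
--         bf = []
--         while w:
--             bf.append(alphabet.index(w[0]))
--             w = w.lstrip(w[0])
--         return bf
--
--     return [baseform(word) for word in vocab], len(alphabet)
-- ===== Notes on version B (the rewrite author's own statement) =====
-- stated objective: alternative
-- what changed: Replaces A's per-character scan with a lastfeneme sentinel state machine and a precomputed dict by run-peeling: repeatedly take the first letter, look up its position with alphabet.index, and strip the whole maximal run with str.lstrip, so no previous-value state is kept at all.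
import Mathlib
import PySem

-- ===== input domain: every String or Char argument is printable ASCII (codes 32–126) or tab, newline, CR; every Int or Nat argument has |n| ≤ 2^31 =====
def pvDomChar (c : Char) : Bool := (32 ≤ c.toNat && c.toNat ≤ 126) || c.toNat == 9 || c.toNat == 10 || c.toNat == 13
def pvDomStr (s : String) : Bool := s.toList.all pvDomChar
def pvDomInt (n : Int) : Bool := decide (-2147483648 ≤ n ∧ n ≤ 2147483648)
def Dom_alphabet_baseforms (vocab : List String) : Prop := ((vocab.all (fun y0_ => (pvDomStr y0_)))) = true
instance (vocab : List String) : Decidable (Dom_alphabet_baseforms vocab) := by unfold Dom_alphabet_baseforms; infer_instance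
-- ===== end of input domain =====

-- B replaces A's per-character lastfeneme state machine and dict with run-peeling:
-- repeatedly look up the first letter with alphabet.index and strip the maximal run
-- with str.lstrip (alternative decomposition, no previous-value state).
-- Pre_ excludes words containing (after lowering) a character outside the alphabet:
-- there A raises KeyError (and B raises ValueError).

-- ===== PORT A =====
-- alphabet = 'abcdefghijklmnopqrstuwvxyz0123456789' (as its character list)
def pvAlphabet : List Char := ['a', 'b', 'c', 'd', 'e', 'f', 'g', 'h', 'i', 'j', 'k', 'l', 'm', 'n', 'o', 'p', 'q', 'r', 's', 't', 'u', 'w', 'v', 'x', 'y', 'z', '0', '1', '2', '3', '4', '5', '6', '7', '8', '9']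

-- alpha = dict((letter, idx) for idx, letter in enumerate(alphabet))
def pvAlpha : PySem.Dict Char Int :=
  PySem.Dict.ofList ((PySem.List.enumerate pvAlphabet).map (fun p => (p.2, p.1)))

-- inner loop of A; lastfeneme's initial string sentinel '-1' (never equal to an int index)
-- is modelled by `none`; alpha[letter] (KeyError = none, excluded by Pre_) via get?/getD
def pvLoopA : List Char → List Int → Option Int → List Int
  | [], bf, _ => bf
  | c :: cs, bf, last =>
      let idx := (pvAlpha.get? c).getD (-1)
      if some idx ≠ last then pvLoopA cs (bf ++ [idx]) (some idx)
      else pvLoopA cs bf last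

def alphabet_baseforms (vocab : List String) : List (List Int) × Int :=
  (vocab.foldl (fun out word => out ++ [pvLoopA (PySem.Chars.lower word.toList) [] none]) [],
   (pvAlphabet.length : Int))

-- ===== PORT B =====
-- alphabet.index(c): ValueError (= none) excluded by Pre_
def pvIdxFind (c : Char) : Int := ((PySem.List.index? pvAlphabet c).map (Int.ofNat)).getD (-1)

-- while w: bf.append(alphabet.index(w[0])); w = w.lstrip(w[0])
-- w.lstrip(w[0]) strips all leading copies of the first char = dropWhile (· == w[0]) on the tail
def pvRunPeel : List Char → List Int → List Int
  | [], bf => bf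
  | c :: cs, bf => pvRunPeel (cs.dropWhile (· == c)) (bf ++ [pvIdxFind c])
termination_by w _ => w.length
decreasing_by
  simpa using Nat.lt_succ_of_le (List.length_dropWhile_le _ _)

def alphabet_baseforms_alt (vocab : List String) : List (List Int) × Int :=
  (vocab.map (fun word => pvRunPeel (PySem.Chars.lower word.toList) []),
   (pvAlphabet.length : Int))

-- ===== PRECONDITION & SPEC =====
-- Pre_ excludes exactly the inputs where A raises KeyError (and B ValueError): a word
-- containing, after lowering, a character outside the 36-letter alphabet.
def Pre_alphabet_baseforms (vocab : List String) : Prop :=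
  (vocab.all (fun w => (PySem.Chars.lower w.toList).all (fun c => pvAlphabet.contains c))) = true
instance (vocab : List String) : Decidable (Pre_alphabet_baseforms vocab) := by
  unfold Pre_alphabet_baseforms; infer_instance
def pvWitness_alphabet_baseforms : List String := ["Hello", "AA1", "z00m"]

def Spec_alphabet_baseforms (vocab : List String) (out : List (List Int) × Int) : Prop := out = alphabet_baseforms_alt vocab
instance (vocab : List String) (out : List (List Int) × Int) : Decidable (Spec_alphabet_baseforms vocab out) := by unfold Spec_alphabet_baseforms; infer_instance

-- ===== CLAIM (what is proved, stated in full; the proofs are below) =====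
def Claim_equal_alphabet_baseforms : Prop := ∀ (vocab : List String), Dom_alphabet_baseforms vocab → Pre_alphabet_baseforms vocab → Spec_alphabet_baseforms vocab (alphabet_baseforms vocab)

-- ===== LEMMAS AND PROOFS =====
def pvIdx (c : Char) : Int := (pvAlpha.get? c).getD (-1)

set_option maxRecDepth 8000 in
lemma pv_inj_all : (pvAlphabet.all (fun c => pvAlphabet.all (fun d => (pvIdx c == pvIdx d) == (c == d)))) = true := by decide

lemma pv_inj : ∀ c ∈ pvAlphabet, ∀ d ∈ pvAlphabet, (pvIdx c = pvIdx d ↔ c = d) := by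
  intro c hc d hd
  have h2 : (pvIdx c == pvIdx d) = (c == d) :=
    eq_of_beq (List.all_eq_true.mp (List.all_eq_true.mp pv_inj_all c hc) d hd)
  constructor
  · intro he
    exact beq_iff_eq.mp (by rw [← h2]; exact beq_iff_eq.mpr he)
  · intro he
    exact beq_iff_eq.mp (by rw [h2]; exact beq_iff_eq.mpr he)

set_option maxRecDepth 8000 in
lemma pv_find_all : (pvAlphabet.all (fun c => pvIdxFind c == pvIdx c)) = true := by decide

lemma pv_find_eq : ∀ c ∈ pvAlphabet, pvIdxFind c = pvIdx c := fun c hc =>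
  eq_of_beq (List.all_eq_true.mp pv_find_all c hc)

-- the chars A's loop has already consumed, as seen by B's run-peeling
def pvSkip (p : Option Char) (w : List Char) : List Char :=
  match p with
  | none => w
  | some q => w.dropWhile (· == q)

lemma pv_main : ∀ (w : List Char) (bf : List Int) (p : Option Char),
    (∀ c ∈ w, c ∈ pvAlphabet) → (∀ q, p = some q → q ∈ pvAlphabet) →
    pvLoopA w bf (p.map pvIdx) = pvRunPeel (pvSkip p w) bf := by
  intro w
  induction w with
  | nil =>
    intro bf p _ _
    cases p <;> simp [pvLoopA, pvSkip, pvRunPeel]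
  | cons c cs ih =>
    intro bf p hall hp
    have hc : c ∈ pvAlphabet := hall c (by simp)
    have hcs : ∀ x ∈ cs, x ∈ pvAlphabet := fun x hx => hall x (by simp [hx])
    cases p with
    | none =>
      have hstep : pvLoopA (c :: cs) bf none = pvLoopA cs (bf ++ [pvIdx c]) (some (pvIdx c)) := by
        simp [pvLoopA, pvIdx]
      rw [show (Option.map pvIdx none) = (none : Option Int) from rfl] at *
      rw [hstep]
      have := ih (bf ++ [pvIdx c]) (some c) hcs (fun q hq => by cases hq; exact hc)
      simp only [Option.map_some] at this
      rw [this]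
      simp [pvSkip, pvRunPeel, pv_find_eq c hc]
    | some q =>
      have hq : q ∈ pvAlphabet := hp q rfl
      simp only [Option.map_some]
      by_cases hcq : c = q
      · subst hcq
        have hstep : pvLoopA (c :: cs) bf (some (pvIdx c)) = pvLoopA cs bf (some (pvIdx c)) := by
          simp [pvLoopA, pvIdx]
        rw [hstep]
        have := ih bf (some c) hcs (fun x hx => by cases hx; exact hc)
        simp only [Option.map_some] at this
        rw [this]
        simp [pvSkip]
      · have hne : pvIdx c ≠ pvIdx q := fun h => hcq ((pv_inj c hc q hq).mp h)
        have hstep : pvLoopA (c :: cs) bf (some (pvIdx q)) =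
            pvLoopA cs (bf ++ [pvIdx c]) (some (pvIdx c)) := by
          simp [pvLoopA, pvIdx]
          intro h
          exact absurd h hne
        rw [hstep]
        have := ih (bf ++ [pvIdx c]) (some c) hcs (fun x hx => by cases hx; exact hc)
        simp only [Option.map_some] at this
        rw [this]
        have hbc : (c == q) = false := by simpa using hcq
        simp [pvSkip, List.dropWhile, hbc, pvRunPeel, pv_find_eq c hc]

lemma pv_foldl_map (l : List String) (acc : List (List Int)) :
    l.foldl (fun out word => out ++ [pvLoopA (PySem.Chars.lower word.toList) [] none]) acc =
      acc ++ l.map (fun word => pvLoopA (PySem.Chars.lower word.toList) [] none) := by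
  induction l generalizing acc with
  | nil => simp
  | cons w ws ih => simp [List.foldl_cons, ih]

-- ===== VERDICT (by name: the statement is the Claim_ definition above) =====
theorem alphabet_baseforms_spec : Claim_equal_alphabet_baseforms := by
  intro vocab _ hpre
  unfold Spec_alphabet_baseforms alphabet_baseforms alphabet_baseforms_alt
  refine Prod.ext ?_ rfl
  rw [pv_foldl_map]
  simp only [List.nil_append]
  apply List.map_congr_left
  intro word hw
  have hword : ∀ c ∈ PySem.Chars.lower word.toList, c ∈ pvAlphabet := by
    unfold Pre_alphabet_baseforms at hpre
    simp only [List.all_eq_true] at hpre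
    intro c hc
    have := hpre word hw
    simpa using this c hc
  have := pv_main (PySem.Chars.lower word.toList) [] none hword (fun q hq => by cases hq)
  simpa [pvSkip] using this
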